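-- pv_equiv track=rewrite | github.com/jordan-carson/Data_Structures_Algos | Pramp/data_structures/DeletionDistance.py | deletion_distance
-- ===== SOURCE A (Python) =====
-- def deletion_distance(str1, str2):
--     memory = [[0 for _ in range(len(str2) + 1)] for _ in range(len(str1) + 1)]
--     for i in range(len(str1) + 1):
--         memory[i][0] = i
--
--     for j in range(len(str2) + 1):
--         memory[0][j] = j
--
--     for i in range(1, len(str1) + 1):
--         for j in range(1, len(str2) + 1):
--             if str1[i - 1] == str2[j - 1]:
--                 memory[i][j] = min(memory[i - 1][j - 1], memory[i - 1][j] + 1, memory[i][j - 1] + 1)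
--             else:
--                 memory[i][j] = min(memory[i - 1][j], memory[i][j - 1]) + 1
--
--     return memory[len(str1)][len(str2)]  # your code goes here
-- ===== SOURCE B (Python) =====
-- def deletion_distance(str1, str2):
--     # LCS with a rolling row: deletion distance = len1 + len2 - 2*LCS(str1, str2)
--     row = [0] * (len(str2) + 1)
--     for c1 in str1:
--         cur = [0]
--         for pdiag, pup, c2 in zip(row, row[1:], str2):
--             cur.append(pdiag + 1 if c1 == c2 else max(pup, cur[-1]))
--         row = cur
--     return len(str1) + len(str2) - 2 * row[-1]
-- ===== Notes on version B (the rewrite author's own statement) =====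
-- stated objective: alternative
-- what changed: Replaces the full (m+1)x(n+1) minimizing deletion-distance table by a rolling single-row LCS computation and returns len1+len2-2*LCS via the classic identity.
import Mathlib
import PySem

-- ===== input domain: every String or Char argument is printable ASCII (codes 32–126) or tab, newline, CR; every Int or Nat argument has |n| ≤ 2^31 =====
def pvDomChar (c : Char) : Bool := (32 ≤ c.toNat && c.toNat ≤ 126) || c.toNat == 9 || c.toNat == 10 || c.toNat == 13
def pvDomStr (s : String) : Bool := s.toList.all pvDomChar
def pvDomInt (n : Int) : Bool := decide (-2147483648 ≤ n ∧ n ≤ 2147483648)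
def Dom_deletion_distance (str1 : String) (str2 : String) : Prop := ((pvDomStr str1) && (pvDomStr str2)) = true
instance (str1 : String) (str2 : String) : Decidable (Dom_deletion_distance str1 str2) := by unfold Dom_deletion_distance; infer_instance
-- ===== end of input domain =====

-- B replaces A's full (m+1)×(n+1) minimizing deletion-distance table by a rolling one-row
-- LCS computation and returns len1 + len2 - 2*LCS (alternative decomposition, O(n) row space).

-- ===== PORT A =====
-- memory[i][j] read / in-place assignment (all indices A uses are in range, so getD/set are exact)
def ddGet (mem : List (List Int)) (i j : Nat) : Int := (mem.getD i []).getD j 0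

def ddSet (mem : List (List Int)) (i j : Nat) (v : Int) : List (List Int) :=
  mem.set i ((mem.getD i []).set j v)

-- body of A's inner loop (one j-iteration); branches in A's order
def ddInner (s t : List Char) (i : Nat) (mem : List (List Int)) (j : Nat) : List (List Int) :=
  if s.getD (i - 1) ' ' == t.getD (j - 1) ' ' then
    ddSet mem i j (min (ddGet mem (i - 1) (j - 1))
      (min (ddGet mem (i - 1) j + 1) (ddGet mem i (j - 1) + 1)))
  else
    ddSet mem i j (min (ddGet mem (i - 1) j) (ddGet mem i (j - 1)) + 1)

-- A's inner loop: for j in range(1, len(str2)+1)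
def ddOuter (s t : List Char) (mem : List (List Int)) (i : Nat) : List (List Int) :=
  (List.range' 1 t.length).foldl (ddInner s t i) mem

def deletion_distance (str1 : String) (str2 : String) : Int :=
  let s := str1.toList
  let t := str2.toList
  let mem0 := (List.range (s.length + 1)).map (fun _ => (List.range (t.length + 1)).map (fun _ => (0 : Int)))
  let mem1 := (List.range (s.length + 1)).foldl (fun mem i => ddSet mem i 0 (i : Int)) mem0
  let mem2 := (List.range (t.length + 1)).foldl (fun mem j => ddSet mem 0 j (j : Int)) mem1
  let mem3 := (List.range' 1 s.length).foldl (ddOuter s t) mem2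
  ddGet mem3 s.length t.length

-- ===== PORT B =====
-- the `for pdiag, pup, c2 in zip(row, row[1:], str2)` loop of Source B:
-- walks the previous row and str2 in lockstep, carrying cur[-1]
def lcsGo (c1 : Char) : List Int → List Char → Int → List Int
  | pdiag :: pup :: ps, c2 :: ts, last =>
      let v := if c1 == c2 then pdiag + 1 else max pup last
      v :: lcsGo c1 (pup :: ps) ts v
  | _, _, _ => []

-- one str1-character step: cur = [0] ++ …
def lcsStep (t : List Char) (row : List Int) (c1 : Char) : List Int :=
  0 :: lcsGo c1 row t 0

def deletion_distance_alt (str1 : String) (str2 : String) : Int :=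
  let s := str1.toList
  let t := str2.toList
  let row := s.foldl (lcsStep t) (List.replicate (t.length + 1) 0)
  (s.length : Int) + t.length - 2 * (row.getLast?.getD 0)

-- ===== PRECONDITION & SPEC =====
def Spec_deletion_distance (str1 : String) (str2 : String) (out : Int) : Prop := out = deletion_distance_alt str1 str2
instance (str1 : String) (str2 : String) (out : Int) : Decidable (Spec_deletion_distance str1 str2 out) := by unfold Spec_deletion_distance; infer_instance

-- ===== CLAIM (what is proved, stated in full; the proofs are below) =====
def Claim_equal_deletion_distance : Prop := ∀ (str1 : String) (str2 : String), Dom_deletion_distance str1 str2 → Spec_deletion_distance str1 str2 (deletion_distance str1 str2)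

-- ===== LEMMAS AND PROOFS =====

-- A's final table values, as a pure recursive function (cell (i,j) of memory after the loops)
def fA (s t : List Char) : Nat → Nat → Int
  | i, 0 => (i : Int)
  | 0, j + 1 => (j : Int) + 1
  | i + 1, j + 1 =>
    if s.getD i ' ' == t.getD j ' ' then
      min (fA s t i j) (min (fA s t i (j + 1) + 1) (fA s t (i + 1) j + 1))
    else
      min (fA s t i (j + 1)) (fA s t (i + 1) j) + 1
  termination_by i j => (i, j)

-- LCS-table values (what B's rolling row computes)
def gL (s t : List Char) : Nat → Nat → Int
  | _, 0 => 0
  | 0, _ + 1 => 0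
  | i + 1, j + 1 =>
    if s.getD i ' ' == t.getD j ' ' then gL s t i j + 1
    else max (gL s t i (j + 1)) (gL s t (i + 1) j)
  termination_by i j => (i, j)

lemma gL_zero_right (s t : List Char) (i : Nat) : gL s t i 0 = 0 := by
  cases i <;> simp [gL]

lemma gL_zero_left (s t : List Char) (j : Nat) : gL s t 0 j = 0 := by
  cases j <;> simp [gL]

lemma fA_zero_right (s t : List Char) (i : Nat) : fA s t i 0 = (i : Int) := by
  cases i <;> simp [fA]

lemma fA_zero_left (s t : List Char) (j : Nat) : fA s t 0 j = (j : Int) := by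
  cases j <;> simp [fA]

-- monotonicity and 1-Lipschitz bounds for the LCS table, by strong induction on i+j
lemma gL_bounds (s t : List Char) : ∀ N i j, i + j ≤ N →
    gL s t i j ≤ gL s t (i + 1) j ∧ gL s t i j ≤ gL s t i (j + 1) ∧
    gL s t (i + 1) j ≤ gL s t i j + 1 ∧ gL s t i (j + 1) ≤ gL s t i j + 1 := by
  intro N
  induction N with
  | zero =>
    intro i j h
    have hi : i = 0 := by omega
    have hj : j = 0 := by omega
    subst hi; subst hj
    refine ⟨?_, ?_, ?_, ?_⟩ <;> simp [gL]
  | succ N ih =>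
    intro i j h
    refine ⟨?_, ?_, ?_, ?_⟩
    · cases j with
      | zero => simp [gL_zero_right]
      | succ k =>
        have hk : i + k ≤ N := by omega
        simp only [gL]
        split_ifs with hc
        · exact (ih i k hk).2.2.2
        · exact le_max_left _ _
    · cases i with
      | zero => simp [gL_zero_left]
      | succ k =>
        have hk : k + j ≤ N := by omega
        conv_rhs => rw [gL]
        split_ifs with hc
        · exact le_trans ((ih k j hk).2.2.1) (by omega)
        · exact le_max_right _ _
    · cases j with
      | zero => simp [gL_zero_right]
      | succ k =>
        have hk : i + k ≤ N := by omega
        conv_lhs => rw [gL]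
        split_ifs with hc
        · have := (ih i k hk).2.1
          omega
        · apply max_le
          · omega
          · have h1 := (ih i k hk).2.2.1
            have h2 := (ih i k hk).2.1
            omega
    · cases i with
      | zero => simp [gL_zero_left]
      | succ k =>
        have hk : k + j ≤ N := by omega
        conv_lhs => rw [gL]
        split_ifs with hc
        · have := (ih k j hk).1
          omega
        · apply max_le
          · have h1 := (ih k j hk).2.2.2
            have h2 := (ih k j hk).1
            omega
          · omega

-- the deletion-distance/LCS identity, cell by cell
lemma fA_eq (s t : List Char) : ∀ N i j, i + j ≤ N →
    fA s t i j = (i : Int) + (j : Int) - 2 * gL s t i j := by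
  intro N
  induction N with
  | zero =>
    intro i j h
    have hi : i = 0 := by omega
    have hj : j = 0 := by omega
    subst hi; subst hj
    simp [fA, gL]
  | succ N ih =>
    intro i j h
    match i, j with
    | i, 0 => simp [fA, gL_zero_right]
    | 0, j + 1 => simp [fA, gL_zero_left]
    | i + 1, j + 1 =>
      have h1 := ih i j (by omega)
      have h2 := ih i (j + 1) (by omega)
      have h3 := ih (i + 1) j (by omega)
      have hb := gL_bounds s t (i + j) i j le_rfl
      obtain ⟨_, _, hb3, hb4⟩ := hb
      simp only [fA, gL]
      split_ifs with hc
      · rw [h1, h2, h3]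
        push_cast
        rw [min_def, min_def]
        split_ifs <;> omega
      · rw [h2, h3]
        push_cast
        rw [min_def, max_def]
        split_ifs <;> omega

-- functional (m+1)×(n+1) table
def Tab (m n : Nat) (f : Nat → Nat → Int) : List (List Int) :=
  (List.range (m + 1)).map (fun i => (List.range (n + 1)).map (fun j => f i j))

lemma Tab_get (m n : Nat) (f : Nat → Nat → Int) (i j : Nat) (hi : i ≤ m) (hj : j ≤ n) :
    ddGet (Tab m n f) i j = f i j := by
  have hi' : i < m + 1 := by omega
  have hj' : j < n + 1 := by omega
  simp [ddGet, Tab, List.getD_eq_getElem?_getD, hi', hj']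

lemma Tab_set (m n : Nat) (f : Nat → Nat → Int) (i j : Nat) (v : Int) (hi : i ≤ m) (hj : j ≤ n) :
    ddSet (Tab m n f) i j v = Tab m n (fun i' j' => if i' = i ∧ j' = j then v else f i' j') := by
  have hi' : i < m + 1 := by omega
  have hj' : j < n + 1 := by omega
  apply List.ext_getElem
  · simp [ddSet, Tab]
  intro k h1 h2
  simp only [Tab, List.length_map, List.length_range] at h2
  simp only [ddSet, Tab, List.getD_eq_getElem?_getD, List.getElem?_map, List.getElem?_range, hi',
    List.getElem_set, List.getElem_map, List.getElem_range]
  by_cases hk : i = k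
  · subst hk
    simp
    apply List.ext_getElem
    · simp
    intro l h3 h4
    simp only [List.length_map, List.length_range] at h4
    simp [List.getElem_set]
    by_cases hl : j = l
    · subst hl; simp
    · simp [hl]
      intro h; exact absurd h.symm hl
  · have hk' : ¬ k = i := fun h => hk h.symm
    simp only [if_neg hk]
    apply List.map_congr_left
    intro x hx
    simp [hk']

lemma Tab_congr (m n : Nat) (f g : Nat → Nat → Int)
    (h : ∀ i j, i ≤ m → j ≤ n → f i j = g i j) : Tab m n f = Tab m n g := by
  unfold Tab
  apply List.map_congr_left
  intro i hi
  apply List.map_congr_left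
  intro j hj
  simp only [List.mem_range] at hi hj
  exact h i j (by omega) (by omega)

-- table contents after the whole computation (i' ≤ K rows final) / mid-row (row i, first l cells final)
def valT (s t : List Char) (K i j : Nat) : Int :=
  if i ≤ K ∨ j = 0 then fA s t i j else 0

def valW (s t : List Char) (i l i' j : Nat) : Int :=
  if i' < i ∨ j = 0 ∨ (i' = i ∧ j ≤ l) then fA s t i' j else 0

lemma init_col (m n : Nat) (f : Nat → Nat → Int) :
    ∀ K, K ≤ m + 1 → (List.range K).foldl (fun mem i => ddSet mem i 0 (i : Int)) (Tab m n f)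
      = Tab m n (fun i j => if i < K ∧ j = 0 then (i : Int) else f i j) := by
  intro K
  induction K with
  | zero =>
    intro _
    simp only [List.range_zero, List.foldl_nil]
    exact (Tab_congr _ _ _ _ (by intro i j _ _; rw [if_neg (by omega)])).symm
  | succ K ih =>
    intro hK
    rw [List.range_succ, List.foldl_append, ih (by omega)]
    simp only [List.foldl_cons, List.foldl_nil]
    rw [Tab_set m n _ K 0 _ (by omega) (by omega)]
    apply Tab_congr
    intro i j hi hj
    by_cases hE : i = K ∧ j = 0
    · obtain ⟨rfl, rfl⟩ := hE
      rw [if_pos ⟨rfl, rfl⟩, if_pos (by omega)]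
    · rw [if_neg hE]
      exact if_congr (by omega) rfl rfl

lemma init_row (m n : Nat) (f : Nat → Nat → Int) :
    ∀ K, K ≤ n + 1 → (List.range K).foldl (fun mem j => ddSet mem 0 j (j : Int)) (Tab m n f)
      = Tab m n (fun i j => if i = 0 ∧ j < K then (j : Int) else f i j) := by
  intro K
  induction K with
  | zero =>
    intro _
    simp only [List.range_zero, List.foldl_nil]
    exact (Tab_congr _ _ _ _ (by intro i j _ _; rw [if_neg (by omega)])).symm
  | succ K ih =>
    intro hK
    rw [List.range_succ, List.foldl_append, ih (by omega)]
    simp only [List.foldl_cons, List.foldl_nil]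
    rw [Tab_set m n _ 0 K _ (by omega) (by omega)]
    apply Tab_congr
    intro i j hi hj
    by_cases hE : i = 0 ∧ j = K
    · obtain ⟨rfl, rfl⟩ := hE
      rw [if_pos ⟨rfl, rfl⟩, if_pos (by omega)]
    · rw [if_neg hE]
      exact if_congr (by omega) rfl rfl

-- one full run of A's inner loop over row K+1
lemma inner_loop (s t : List Char) (m K : Nat) (hK : K + 1 ≤ m) :
    ∀ L, L ≤ t.length →
      (List.range' 1 L).foldl (ddInner s t (K + 1)) (Tab m t.length (valW s t (K + 1) 0))
        = Tab m t.length (valW s t (K + 1) L) := by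
  intro L
  induction L with
  | zero => simp
  | succ L ih =>
    intro hL
    have hL' : L ≤ t.length := by omega
    have e := List.range'_concat (s := 1) (n := L) (step := 1)
    simp only [Nat.one_mul] at e
    rw [e, List.foldl_append, ih hL']
    simp only [List.foldl_cons, List.foldl_nil]
    have h1L : 1 + L = L + 1 := by omega
    rw [h1L]
    unfold ddInner
    simp only [Nat.add_sub_cancel]
    rw [Tab_get m t.length _ K L (by omega) (by omega),
        Tab_get m t.length _ K (L + 1) (by omega) (by omega),
        Tab_get m t.length _ (K + 1) L (by omega) (by omega)]
    have eKL : valW s t (K + 1) L K L = fA s t K L := if_pos (by omega)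
    have eKL1 : valW s t (K + 1) L K (L + 1) = fA s t K (L + 1) := if_pos (by omega)
    have eK1L : valW s t (K + 1) L (K + 1) L = fA s t (K + 1) L := if_pos (by omega)
    rw [eKL, eKL1, eK1L]
    have hfa : (if s.getD K ' ' == t.getD L ' ' then
        min (fA s t K L) (min (fA s t K (L + 1) + 1) (fA s t (K + 1) L + 1))
      else min (fA s t K (L + 1)) (fA s t (K + 1) L) + 1) = fA s t (K + 1) (L + 1) := by
      rw [fA]
    split_ifs at hfa ⊢ with hc
    · rw [Tab_set m t.length _ (K + 1) (L + 1) _ (by omega) (by omega)]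
      apply Tab_congr
      intro i' j' hi' hj'
      by_cases hE : i' = K + 1 ∧ j' = L + 1
      · obtain ⟨rfl, rfl⟩ := hE
        rw [if_pos ⟨rfl, rfl⟩, hfa]
        unfold valW
        rw [if_pos (by omega)]
      · rw [if_neg hE]
        unfold valW
        exact if_congr (by omega) rfl rfl
    · rw [Tab_set m t.length _ (K + 1) (L + 1) _ (by omega) (by omega)]
      apply Tab_congr
      intro i' j' hi' hj'
      by_cases hE : i' = K + 1 ∧ j' = L + 1
      · obtain ⟨rfl, rfl⟩ := hE
        rw [if_pos ⟨rfl, rfl⟩, hfa]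
        unfold valW
        rw [if_pos (by omega)]
      · rw [if_neg hE]
        unfold valW
        exact if_congr (by omega) rfl rfl

-- A's outer loop
lemma outer_loop (s t : List Char) (m : Nat) (hm : m = s.length) :
    ∀ K, K ≤ m →
      (List.range' 1 K).foldl (ddOuter s t) (Tab m t.length (valT s t 0))
        = Tab m t.length (valT s t K) := by
  intro K
  induction K with
  | zero => simp
  | succ K ih =>
    intro hK
    have e := List.range'_concat (s := 1) (n := K) (step := 1)
    simp only [Nat.one_mul] at e
    rw [e, List.foldl_append, ih (by omega)]
    simp only [List.foldl_cons, List.foldl_nil]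
    have h1K : 1 + K = K + 1 := by omega
    rw [h1K]
    unfold ddOuter
    have e0 : Tab m t.length (valT s t K) = Tab m t.length (valW s t (K + 1) 0) := by
      apply Tab_congr
      intro i' j' hi' hj'
      unfold valT valW
      exact if_congr (by omega) rfl rfl
    rw [e0, inner_loop s t m K (by omega) t.length le_rfl]
    apply Tab_congr
    intro i' j' hi' hj'
    unfold valT valW
    exact if_congr (by omega) rfl rfl

-- A computes fA at the corner
lemma a_eq (str1 str2 : String) :
    deletion_distance str1 str2 = fA str1.toList str2.toList str1.toList.length str2.toList.length := by
  set s := str1.toList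
  set t := str2.toList
  simp only [deletion_distance]
  have e0 : (List.range (s.length + 1)).map
      (fun _ => (List.range (t.length + 1)).map (fun _ => (0 : Int)))
      = Tab s.length t.length (fun _ _ => 0) := rfl
  rw [e0, init_col s.length t.length _ (s.length + 1) le_rfl,
      init_row s.length t.length _ (t.length + 1) le_rfl]
  have e1 : Tab s.length t.length
      (fun i j => if i = 0 ∧ j < t.length + 1 then (j : Int)
        else if i < s.length + 1 ∧ j = 0 then (i : Int) else 0)
      = Tab s.length t.length (valT s t 0) := by
    apply Tab_congr
    intro i j hi hj
    unfold valT
    by_cases hi0 : i = 0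
    · subst hi0
      rw [if_pos ⟨rfl, by omega⟩, if_pos (by omega), fA_zero_left]
    · rw [if_neg (by omega)]
      by_cases hj0 : j = 0
      · subst hj0
        rw [if_pos ⟨by omega, rfl⟩, if_pos (by omega), fA_zero_right]
      · rw [if_neg (by omega), if_neg (by omega)]
  rw [e1, outer_loop s t s.length rfl s.length le_rfl,
      Tab_get s.length t.length _ s.length t.length le_rfl le_rfl]
  unfold valT
  rw [if_pos (by omega)]

-- B-side: the zip walk computes one LCS row from the previous one
lemma lcsGo_spec (s t : List Char) (k : Nat) :
    ∀ d j, j + d = t.length →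
      lcsGo (s.getD k ' ') ((List.range' j (d + 1)).map (fun j' => gL s t k j'))
          (t.drop j) (gL s t (k + 1) j)
        = (List.range' (j + 1) d).map (fun j' => gL s t (k + 1) j') := by
  intro d
  induction d with
  | zero =>
    intro j hj
    have hj' : j = t.length := by omega
    subst hj'
    simp [lcsGo, List.drop_length]
  | succ d ih =>
    intro j hj
    have hjlt : j < t.length := by omega
    simp only [List.range'_succ, List.map_cons]
    rw [List.drop_eq_getElem_cons hjlt]
    have hgd : t[j] = t.getD j ' ' := (List.getD_eq_getElem t ' ' hjlt).symm
    rw [hgd]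
    simp only [lcsGo]
    have hv : (if s.getD k ' ' == t.getD j ' ' then gL s t k j + 1
        else max (gL s t k (j + 1)) (gL s t (k + 1) j)) = gL s t (k + 1) (j + 1) := by
      rw [gL]
    rw [hv]
    congr 1
    exact ih (j + 1) (by omega)

lemma take_concat_getElem (l : List Char) (k : Nat) (h : k < l.length) :
    l.take (k + 1) = l.take k ++ [l[k]] := by
  rw [List.take_add_one, List.getElem?_eq_getElem h]
  rfl

-- B's fold over the first k characters of str1 produces row k of the LCS table
lemma row_spec (s t : List Char) : ∀ k, k ≤ s.length →
    (s.take k).foldl (lcsStep t) (List.replicate (t.length + 1) 0)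
      = (List.range' 0 (t.length + 1)).map (fun j => gL s t k j) := by
  intro k
  induction k with
  | zero =>
    intro _
    have e : (List.range' 0 (t.length + 1)).map (fun j => gL s t 0 j)
        = (List.range' 0 (t.length + 1)).map (fun _ => (0 : Int)) :=
      List.map_congr_left (fun j _ => gL_zero_left s t j)
    rw [List.take_zero, List.foldl_nil, e, List.map_const', List.length_range']
  | succ k ih =>
    intro hk
    have hk' : k < s.length := by omega
    rw [take_concat_getElem s k hk', List.foldl_append, ih (by omega)]
    simp only [List.foldl_cons, List.foldl_nil]
    unfold lcsStep
    have hgd : s[k] = s.getD k ' ' := (List.getD_eq_getElem s ' ' hk').symm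
    have h0 : (0 : Int) = gL s t (k + 1) 0 := (gL_zero_right s t (k + 1)).symm
    rw [hgd]
    have hs := lcsGo_spec s t k t.length 0 (by omega)
    rw [List.drop_zero] at hs
    rw [h0, hs]
    rw [List.range'_succ, List.map_cons, gL_zero_right]

-- B computes the identity at the corner
lemma alt_eq (str1 str2 : String) :
    deletion_distance_alt str1 str2 = (str1.toList.length : Int) + str2.toList.length
      - 2 * gL str1.toList str2.toList str1.toList.length str2.toList.length := by
  simp only [deletion_distance_alt]
  have e : str1.toList.foldl (lcsStep str2.toList) (List.replicate (str2.toList.length + 1) 0)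
      = (List.range' 0 (str2.toList.length + 1)).map
          (fun j => gL str1.toList str2.toList str1.toList.length j) := by
    have h := row_spec str1.toList str2.toList str1.toList.length le_rfl
    rwa [List.take_length] at h
  rw [e]
  have e2 : List.range' 0 (str2.toList.length + 1)
      = List.range' 0 str2.toList.length ++ [str2.toList.length] := by
    have h := List.range'_concat (s := 0) (n := str2.toList.length) (step := 1)
    simpa using h
  rw [e2, List.map_append, List.map_cons, List.map_nil, List.getLast?_append]
  simp [String.length_toList]

-- ===== VERDICT (by name: the statement is the Claim_ definition above) =====
theorem deletion_distance_spec : Claim_equal_deletion_distance := by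
  intro str1 str2 _
  unfold Spec_deletion_distance
  rw [a_eq, alt_eq,
    fA_eq str1.toList str2.toList (str1.toList.length + str2.toList.length) _ _ le_rfl]
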